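-- pv_equiv track=rewrite | github.com/Priscasantos/LANDAGRI-B_Dashboard | scripts/data_generation/data_processing.py | categorize_provider
-- ===== SOURCE A (Python) =====
-- def categorize_provider(provedor: str) -> str:
--     """Categorize provider type."""
--     provider_lower = provedor.lower()
--
--     if any(term in provider_lower for term in ['space', 'esa', 'copernicus', 'nasa', 'inpe']):
--         return 'Space Agency'
--     elif any(term in provider_lower for term in ['university', 'umd', 'maryland']):
--         return 'University'
--     elif any(term in provider_lower for term in ['google', 'microsoft', 'esri']):
--         return 'Tech Company'
--     elif any(term in provider_lower for term in ['government', 'institute', 'ibge', 'conab', 'embrapa']):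
--         return 'Government'
--     elif any(term in provider_lower for term in ['ngo', 'organization']):
--         return 'NGO'
--     else:
--         return 'Other'
-- ===== SOURCE B (Python) =====
-- # Single positional scan: walk every start position of the lowered string once,
-- # check which keyword begins there (term -> priority map), and keep the minimum
-- # priority seen; finally map that priority to its category name.
-- _TERMS = {
--     'space': 0, 'esa': 0, 'copernicus': 0, 'nasa': 0, 'inpe': 0,
--     'university': 1, 'umd': 1, 'maryland': 1,
--     'google': 2, 'microsoft': 2, 'esri': 2,
--     'government': 3, 'institute': 3, 'ibge': 3, 'conab': 3, 'embrapa': 3,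
--     'ngo': 4, 'organization': 4,
-- }
-- _NAMES = ['Space Agency', 'University', 'Tech Company', 'Government', 'NGO']
--
-- def categorize_provider(provedor: str) -> str:
--     s = provedor.lower()
--     best = 5
--     for i in range(len(s) + 1):
--         for term, p in _TERMS.items():
--             if p < best and s.startswith(term, i):
--                 best = p
--     return _NAMES[best] if best < 5 else 'Other'
-- ===== Notes on version B (the rewrite author's own statement) =====
-- stated objective: alternative
-- what changed: Instead of A's ordered if/elif ladder of per-category substring searches, B makes one positional scan over the lowered string, checking at each start position which keyword from a term-to-priority map begins there and keeping the minimum priority, then maps that priority to its category; correctness relies on the minimum matched priority equalling the first matching branch of A.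
import Mathlib
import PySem

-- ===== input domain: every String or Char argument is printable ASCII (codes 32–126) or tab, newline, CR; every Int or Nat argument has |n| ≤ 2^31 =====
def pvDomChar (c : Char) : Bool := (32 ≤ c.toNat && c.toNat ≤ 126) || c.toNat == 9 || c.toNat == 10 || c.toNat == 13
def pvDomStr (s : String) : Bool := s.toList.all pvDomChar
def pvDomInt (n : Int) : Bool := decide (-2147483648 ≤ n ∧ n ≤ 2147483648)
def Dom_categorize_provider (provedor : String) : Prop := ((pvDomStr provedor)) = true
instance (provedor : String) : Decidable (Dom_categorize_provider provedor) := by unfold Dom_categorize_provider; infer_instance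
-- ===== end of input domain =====

-- B replaces A's per-category substring ladder by a single positional scan keeping the
-- minimum matched priority from a term→priority map (alternative algorithm, same cost).

-- ===== PORT A =====
def categorize_provider (provedor : String) : String :=
  let provider_lower := PySem.Str.lower provedor
  if (["space", "esa", "copernicus", "nasa", "inpe"].any fun term => PySem.Str.isIn term provider_lower) then
    "Space Agency"
  else if (["university", "umd", "maryland"].any fun term => PySem.Str.isIn term provider_lower) then
    "University"
  else if (["google", "microsoft", "esri"].any fun term => PySem.Str.isIn term provider_lower) then
    "Tech Company"
  else if (["government", "institute", "ibge", "conab", "embrapa"].any fun term => PySem.Str.isIn term provider_lower) then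
    "Government"
  else if (["ngo", "organization"].any fun term => PySem.Str.isIn term provider_lower) then
    "NGO"
  else
    "Other"

-- ===== PORT B =====
-- the term→priority dict _TERMS of Source B, in its insertion order
def pvTerms : List (String × Nat) :=
  [ ("space", 0), ("esa", 0), ("copernicus", 0), ("nasa", 0), ("inpe", 0),
    ("university", 1), ("umd", 1), ("maryland", 1),
    ("google", 2), ("microsoft", 2), ("esri", 2),
    ("government", 3), ("institute", 3), ("ibge", 3), ("conab", 3), ("embrapa", 3),
    ("ngo", 4), ("organization", 4) ]

def pvNames : List String := ["Space Agency", "University", "Tech Company", "Government", "NGO"]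

-- Python's s.startswith(term, i) with 0 ≤ i ≤ len(s) is exactly startswith on s[i:] = drop i
def pvStep (s : List Char) (i : Nat) (b : Nat) (tp : String × Nat) : Nat :=
  if tp.2 < b ∧ PySem.Chars.startswith (List.drop i s) tp.1.toList = true then tp.2 else b

def categorize_provider_alt (provedor : String) : String :=
  let s := (PySem.Str.lower provedor).toList
  let best := (List.range (s.length + 1)).foldl (fun best i => pvTerms.foldl (pvStep s i) best) 5
  if best < 5 then pvNames.getD best "Other" else "Other"

-- ===== PRECONDITION & SPEC =====
def Spec_categorize_provider (provedor : String) (out : String) : Prop := out = categorize_provider_alt provedor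
instance (provedor : String) (out : String) : Decidable (Spec_categorize_provider provedor out) := by unfold Spec_categorize_provider; infer_instance

-- ===== CLAIM (what is proved, stated in full; the proofs are below) =====
def Claim_equal_categorize_provider : Prop := ∀ (provedor : String), Dom_categorize_provider provedor → Spec_categorize_provider provedor (categorize_provider provedor)


-- ===== LEMMAS AND PROOFS =====

-- the scan's result, abbreviated for the lemmas
def pvScan (s : List Char) : Nat :=
  (List.range (s.length + 1)).foldl (fun best i => pvTerms.foldl (pvStep s i) best) 5

-- "some term of priority p occurs in s"
def pvMatchP (s : List Char) (p : Nat) : Prop :=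
  ∃ tp ∈ pvTerms, tp.2 = p ∧ PySem.Chars.isIn tp.1.toList s = true

lemma pvStep_le (s : List Char) (i b : Nat) (tp : String × Nat) : pvStep s i b tp ≤ b := by
  unfold pvStep; split <;> omega

lemma foldl_pvStep_le (s : List Char) (i : Nat) (L : List (String × Nat)) (b : Nat) :
    L.foldl (pvStep s i) b ≤ b := by
  induction L generalizing b with
  | nil => simp
  | cons tp L ih => exact le_trans (ih _) (pvStep_le s i b tp)

lemma foldl_pvStep_cases (s : List Char) (i : Nat) (L : List (String × Nat)) (b : Nat) :
    L.foldl (pvStep s i) b = b ∨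
      ∃ tp ∈ L, L.foldl (pvStep s i) b = tp.2 ∧
        PySem.Chars.startswith (List.drop i s) tp.1.toList = true := by
  induction L generalizing b with
  | nil => left; rfl
  | cons tp L ih =>
    rcases ih (pvStep s i b tp) with h | ⟨tq, hmem, hq⟩
    · simp only [List.foldl_cons] at h ⊢
      rw [h]
      unfold pvStep
      split
      · next hc => exact Or.inr ⟨tp, by simp, rfl, hc.2⟩
      · left; rfl
    · exact Or.inr ⟨tq, List.mem_cons_of_mem _ hmem, hq⟩

lemma foldl_pvStep_ub (s : List Char) (i : Nat) (tp : String × Nat)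
    (hsw : PySem.Chars.startswith (List.drop i s) tp.1.toList = true) :
    ∀ (L : List (String × Nat)) (b : Nat), tp ∈ L → L.foldl (pvStep s i) b ≤ tp.2 := by
  intro L
  induction L with
  | nil => intro b h; cases h
  | cons tq L ih =>
    intro b h
    rw [List.foldl_cons]
    rcases List.mem_cons.mp h with h | h
    · subst h
      refine le_trans (foldl_pvStep_le s i L _) ?_
      unfold pvStep
      simp only [hsw, and_true]
      split <;> omega
    · exact ih _ h

lemma foldl_outer_le (s : List Char) (R : List Nat) (b : Nat) :
    R.foldl (fun best i => pvTerms.foldl (pvStep s i) best) b ≤ b := by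
  induction R generalizing b with
  | nil => simp
  | cons i R ih =>
    rw [List.foldl_cons]
    exact le_trans (ih _) (foldl_pvStep_le s i pvTerms b)

lemma pvScan_cases (s : List Char) :
    pvScan s = 5 ∨
      ∃ tp ∈ pvTerms, ∃ i, pvScan s = tp.2 ∧
        PySem.Chars.startswith (List.drop i s) tp.1.toList = true := by
  unfold pvScan
  have main : ∀ (R : List Nat) (b : Nat),
      R.foldl (fun best i => pvTerms.foldl (pvStep s i) best) b = b ∨
        ∃ tp ∈ pvTerms, ∃ i, R.foldl (fun best i => pvTerms.foldl (pvStep s i) best) b = tp.2 ∧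
          PySem.Chars.startswith (List.drop i s) tp.1.toList = true := by
    intro R
    induction R with
    | nil => intro b; left; rfl
    | cons i R ih =>
      intro b
      rw [List.foldl_cons]
      rcases ih (pvTerms.foldl (pvStep s i) b) with h | ⟨tp, hmem, j, hj⟩
      · rw [h]
        rcases foldl_pvStep_cases s i pvTerms b with h2 | ⟨tp, hmem, h2, hsw⟩
        · left; exact h2
        · exact Or.inr ⟨tp, hmem, i, h2, hsw⟩
      · exact Or.inr ⟨tp, hmem, j, hj⟩
  exact main _ 5

lemma pvScan_ub (s : List Char) (tp : String × Nat) (hmem : tp ∈ pvTerms)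
    (j : Nat) (hpre : tp.1.toList <+: List.drop j s) :
    pvScan s ≤ tp.2 := by
  have hi : min j s.length ∈ List.range (s.length + 1) := by
    simp only [List.mem_range]; omega
  have hdrop : List.drop (min j s.length) s = List.drop j s := by
    by_cases h : j ≤ s.length
    · rw [min_eq_left h]
    · rw [min_eq_right (by omega), List.drop_eq_nil_of_le (le_refl _),
        List.drop_eq_nil_of_le (by omega)]
  have hsw : PySem.Chars.startswith (List.drop (min j s.length) s) tp.1.toList = true := by
    rw [hdrop]; exact (PySem.Chars.startswith_iff _ _).mpr hpre
  unfold pvScan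
  have main : ∀ (R : List Nat) (b : Nat), min j s.length ∈ R →
      R.foldl (fun best i => pvTerms.foldl (pvStep s i) best) b ≤ tp.2 := by
    intro R
    induction R with
    | nil => intro b h; cases h
    | cons i R ih =>
      intro b h
      rw [List.foldl_cons]
      rcases List.mem_cons.mp h with h | h
      · subst h
        exact le_trans (foldl_outer_le s R _) (foldl_pvStep_ub s _ tp hsw pvTerms b hmem)
      · exact ih _ h
  exact main _ 5 hi

lemma pvScan_le_of_match (s : List Char) (p : Nat) (h : pvMatchP s p) : pvScan s ≤ p := by
  rcases h with ⟨tp, hmem, hp, hin⟩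
  rcases (PySem.Chars.exists_prefix_drop_iff_isIn _ _).mpr hin with ⟨j, hj⟩
  exact hp ▸ pvScan_ub s tp hmem j hj

lemma pvScan_match (s : List Char) : pvScan s = 5 ∨ pvMatchP s (pvScan s) := by
  rcases pvScan_cases s with h | ⟨tp, hmem, i, heq, hsw⟩
  · left; exact h
  · right
    refine ⟨tp, hmem, heq.symm, ?_⟩
    exact (PySem.Chars.exists_prefix_drop_iff_isIn _ _).mp
      ⟨i, (PySem.Chars.startswith_iff _ _).mp hsw⟩

lemma pvMatch_lt5 (s : List Char) (p : Nat) (h : pvMatchP s p) : p < 5 := by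
  rcases h with ⟨tp, hmem, hp, -⟩
  fin_cases hmem <;> omega

lemma pvMatch_iff0 (pl : String) :
    pvMatchP pl.toList 0 ↔ ((["space", "esa", "copernicus", "nasa", "inpe"]).any fun term => PySem.Str.isIn term pl) = true := by
  constructor
  · rintro ⟨tp, hmem, hp, hin⟩
    fin_cases hmem <;> simp_all [PySem.Str.isIn_eq]
  · intro h
    simp only [List.any_cons, List.any_nil, Bool.or_eq_true, Bool.or_false] at h
    rcases h with h|h|h|h|h
    · exact ⟨("space", 0), by simp [pvTerms], rfl, by rw [PySem.Str.isIn_eq] at h; exact h⟩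
    · exact ⟨("esa", 0), by simp [pvTerms], rfl, by rw [PySem.Str.isIn_eq] at h; exact h⟩
    · exact ⟨("copernicus", 0), by simp [pvTerms], rfl, by rw [PySem.Str.isIn_eq] at h; exact h⟩
    · exact ⟨("nasa", 0), by simp [pvTerms], rfl, by rw [PySem.Str.isIn_eq] at h; exact h⟩
    · exact ⟨("inpe", 0), by simp [pvTerms], rfl, by rw [PySem.Str.isIn_eq] at h; exact h⟩

lemma pvMatch_iff1 (pl : String) :
    pvMatchP pl.toList 1 ↔ ((["university", "umd", "maryland"]).any fun term => PySem.Str.isIn term pl) = true := by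
  constructor
  · rintro ⟨tp, hmem, hp, hin⟩
    fin_cases hmem <;> simp_all [PySem.Str.isIn_eq]
  · intro h
    simp only [List.any_cons, List.any_nil, Bool.or_eq_true, Bool.or_false] at h
    rcases h with h|h|h
    · exact ⟨("university", 1), by simp [pvTerms], rfl, by rw [PySem.Str.isIn_eq] at h; exact h⟩
    · exact ⟨("umd", 1), by simp [pvTerms], rfl, by rw [PySem.Str.isIn_eq] at h; exact h⟩
    · exact ⟨("maryland", 1), by simp [pvTerms], rfl, by rw [PySem.Str.isIn_eq] at h; exact h⟩

lemma pvMatch_iff2 (pl : String) :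
    pvMatchP pl.toList 2 ↔ ((["google", "microsoft", "esri"]).any fun term => PySem.Str.isIn term pl) = true := by
  constructor
  · rintro ⟨tp, hmem, hp, hin⟩
    fin_cases hmem <;> simp_all [PySem.Str.isIn_eq]
  · intro h
    simp only [List.any_cons, List.any_nil, Bool.or_eq_true, Bool.or_false] at h
    rcases h with h|h|h
    · exact ⟨("google", 2), by simp [pvTerms], rfl, by rw [PySem.Str.isIn_eq] at h; exact h⟩
    · exact ⟨("microsoft", 2), by simp [pvTerms], rfl, by rw [PySem.Str.isIn_eq] at h; exact h⟩
    · exact ⟨("esri", 2), by simp [pvTerms], rfl, by rw [PySem.Str.isIn_eq] at h; exact h⟩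

lemma pvMatch_iff3 (pl : String) :
    pvMatchP pl.toList 3 ↔ ((["government", "institute", "ibge", "conab", "embrapa"]).any fun term => PySem.Str.isIn term pl) = true := by
  constructor
  · rintro ⟨tp, hmem, hp, hin⟩
    fin_cases hmem <;> simp_all [PySem.Str.isIn_eq]
  · intro h
    simp only [List.any_cons, List.any_nil, Bool.or_eq_true, Bool.or_false] at h
    rcases h with h|h|h|h|h
    · exact ⟨("government", 3), by simp [pvTerms], rfl, by rw [PySem.Str.isIn_eq] at h; exact h⟩
    · exact ⟨("institute", 3), by simp [pvTerms], rfl, by rw [PySem.Str.isIn_eq] at h; exact h⟩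
    · exact ⟨("ibge", 3), by simp [pvTerms], rfl, by rw [PySem.Str.isIn_eq] at h; exact h⟩
    · exact ⟨("conab", 3), by simp [pvTerms], rfl, by rw [PySem.Str.isIn_eq] at h; exact h⟩
    · exact ⟨("embrapa", 3), by simp [pvTerms], rfl, by rw [PySem.Str.isIn_eq] at h; exact h⟩

lemma pvMatch_iff4 (pl : String) :
    pvMatchP pl.toList 4 ↔ ((["ngo", "organization"]).any fun term => PySem.Str.isIn term pl) = true := by
  constructor
  · rintro ⟨tp, hmem, hp, hin⟩
    fin_cases hmem <;> simp_all [PySem.Str.isIn_eq]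
  · intro h
    simp only [List.any_cons, List.any_nil, Bool.or_eq_true, Bool.or_false] at h
    rcases h with h|h
    · exact ⟨("ngo", 4), by simp [pvTerms], rfl, by rw [PySem.Str.isIn_eq] at h; exact h⟩
    · exact ⟨("organization", 4), by simp [pvTerms], rfl, by rw [PySem.Str.isIn_eq] at h; exact h⟩

-- ===== VERDICT (by name: the statement is the Claim_ definition above) =====
theorem categorize_provider_spec : Claim_equal_categorize_provider := by
  intro provedor _
  unfold Spec_categorize_provider
  have alt_eq : categorize_provider_alt provedor =
      (if pvScan ((PySem.Str.lower provedor).toList) < 5 then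
        pvNames.getD (pvScan ((PySem.Str.lower provedor).toList)) "Other" else "Other") := rfl
  simp only [categorize_provider]
  by_cases h0 : ((["space", "esa", "copernicus", "nasa", "inpe"]).any fun term => PySem.Str.isIn term (PySem.Str.lower provedor)) = true
  · have hS : pvScan ((PySem.Str.lower provedor).toList) = 0 := by
      have hle := pvScan_le_of_match _ 0 ((pvMatch_iff0 _).mpr h0)
      omega
    rw [if_pos h0, alt_eq, hS]
    rfl
  · rw [if_neg h0]
    by_cases h1 : ((["university", "umd", "maryland"]).any fun term => PySem.Str.isIn term (PySem.Str.lower provedor)) = true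
    · have hS : pvScan ((PySem.Str.lower provedor).toList) = 1 := by
        have hle := pvScan_le_of_match _ 1 ((pvMatch_iff1 _).mpr h1)
        rcases pvScan_match ((PySem.Str.lower provedor).toList) with h5 | hm
        · omega
        · have hor : pvScan ((PySem.Str.lower provedor).toList) = 0 ∨ pvScan ((PySem.Str.lower provedor).toList) = 1 := by omega
          rcases hor with hj|hj
          · rw [hj] at hm
            exact absurd ((pvMatch_iff0 _).mp hm) h0
          · exact hj
      rw [if_pos h1, alt_eq, hS]
      rfl
    · rw [if_neg h1]
      by_cases h2 : ((["google", "microsoft", "esri"]).any fun term => PySem.Str.isIn term (PySem.Str.lower provedor)) = true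
      · have hS : pvScan ((PySem.Str.lower provedor).toList) = 2 := by
          have hle := pvScan_le_of_match _ 2 ((pvMatch_iff2 _).mpr h2)
          rcases pvScan_match ((PySem.Str.lower provedor).toList) with h5 | hm
          · omega
          · have hor : pvScan ((PySem.Str.lower provedor).toList) = 0 ∨ pvScan ((PySem.Str.lower provedor).toList) = 1 ∨ pvScan ((PySem.Str.lower provedor).toList) = 2 := by omega
            rcases hor with hj|hj|hj
            · rw [hj] at hm
              exact absurd ((pvMatch_iff0 _).mp hm) h0
            · rw [hj] at hm
              exact absurd ((pvMatch_iff1 _).mp hm) h1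
            · exact hj
        rw [if_pos h2, alt_eq, hS]
        rfl
      · rw [if_neg h2]
        by_cases h3 : ((["government", "institute", "ibge", "conab", "embrapa"]).any fun term => PySem.Str.isIn term (PySem.Str.lower provedor)) = true
        · have hS : pvScan ((PySem.Str.lower provedor).toList) = 3 := by
            have hle := pvScan_le_of_match _ 3 ((pvMatch_iff3 _).mpr h3)
            rcases pvScan_match ((PySem.Str.lower provedor).toList) with h5 | hm
            · omega
            · have hor : pvScan ((PySem.Str.lower provedor).toList) = 0 ∨ pvScan ((PySem.Str.lower provedor).toList) = 1 ∨ pvScan ((PySem.Str.lower provedor).toList) = 2 ∨ pvScan ((PySem.Str.lower provedor).toList) = 3 := by omega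
              rcases hor with hj|hj|hj|hj
              · rw [hj] at hm
                exact absurd ((pvMatch_iff0 _).mp hm) h0
              · rw [hj] at hm
                exact absurd ((pvMatch_iff1 _).mp hm) h1
              · rw [hj] at hm
                exact absurd ((pvMatch_iff2 _).mp hm) h2
              · exact hj
          rw [if_pos h3, alt_eq, hS]
          rfl
        · rw [if_neg h3]
          by_cases h4 : ((["ngo", "organization"]).any fun term => PySem.Str.isIn term (PySem.Str.lower provedor)) = true
          · have hS : pvScan ((PySem.Str.lower provedor).toList) = 4 := by
              have hle := pvScan_le_of_match _ 4 ((pvMatch_iff4 _).mpr h4)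
              rcases pvScan_match ((PySem.Str.lower provedor).toList) with h5 | hm
              · omega
              · have hor : pvScan ((PySem.Str.lower provedor).toList) = 0 ∨ pvScan ((PySem.Str.lower provedor).toList) = 1 ∨ pvScan ((PySem.Str.lower provedor).toList) = 2 ∨ pvScan ((PySem.Str.lower provedor).toList) = 3 ∨ pvScan ((PySem.Str.lower provedor).toList) = 4 := by omega
                rcases hor with hj|hj|hj|hj|hj
                · rw [hj] at hm
                  exact absurd ((pvMatch_iff0 _).mp hm) h0
                · rw [hj] at hm
                  exact absurd ((pvMatch_iff1 _).mp hm) h1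
                · rw [hj] at hm
                  exact absurd ((pvMatch_iff2 _).mp hm) h2
                · rw [hj] at hm
                  exact absurd ((pvMatch_iff3 _).mp hm) h3
                · exact hj
            rw [if_pos h4, alt_eq, hS]
            rfl
          · rw [if_neg h4]
            have hS : pvScan ((PySem.Str.lower provedor).toList) = 5 := by
              rcases pvScan_match ((PySem.Str.lower provedor).toList) with h5 | hm
              · exact h5
              · have hlt := pvMatch_lt5 _ _ hm
                have hor : pvScan ((PySem.Str.lower provedor).toList) = 0 ∨ pvScan ((PySem.Str.lower provedor).toList) = 1 ∨ pvScan ((PySem.Str.lower provedor).toList) = 2 ∨ pvScan ((PySem.Str.lower provedor).toList) = 3 ∨ pvScan ((PySem.Str.lower provedor).toList) = 4 := by omega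
                rcases hor with hj|hj|hj|hj|hj
                · rw [hj] at hm
                  exact absurd ((pvMatch_iff0 _).mp hm) h0
                · rw [hj] at hm
                  exact absurd ((pvMatch_iff1 _).mp hm) h1
                · rw [hj] at hm
                  exact absurd ((pvMatch_iff2 _).mp hm) h2
                · rw [hj] at hm
                  exact absurd ((pvMatch_iff3 _).mp hm) h3
                · rw [hj] at hm
                  exact absurd ((pvMatch_iff4 _).mp hm) h4
            rw [alt_eq, hS]
            rfl
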